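-- pv_equiv track=rewrite | github.com/HarryPotterXTX/HOPE | utils/ChainMatrix.py | AddFormula
-- ===== SOURCE A (Python) =====
-- import copy
-- from typing import Dict, List
--
-- def AddFormula(formula1:List, formula2:List):
--     """
--     Function: Addition formula
--     eg. [[2,2,2,5,3]], [[3,2,2,5,3], [1,1,3]]
--         -> [[5,2,2,5,3], [1,1,3]]
--     """
--     formula = copy.deepcopy(formula1 + formula2)
--     result = []
--     Flag = []
--     Index = []
--     for i in range(len(formula)):
--         single_formula = formula[i]
--         order_power = single_formula[1:]
--         if order_power not in Flag:
--             Flag.append(order_power)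
--             Index.append(len(result))
--             result.append(single_formula)
--         else:
--             result[Index[Flag.index(order_power)]][0] += single_formula[0]
--     return result
-- ===== SOURCE B (Python) =====
-- def AddFormula(formula1, formula2):
--     """Staged re-implementation: first collect the distinct tails (order_powers) in
--     first-appearance order, then for each tail sum the lead coefficients of all
--     matching terms with a full scan. No mutable result/Flag/Index bookkeeping."""
--     terms = formula1 + formula2
--     tails = list(dict.fromkeys(tuple(t[1:]) for t in terms))
--     return [[sum(t[0] for t in terms if tuple(t[1:]) == tail), *tail] for tail in tails]
-- ===== Notes on version B (the rewrite author's own statement) =====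
-- stated objective: alternative
-- what changed: Replaced A's single pass that mutates a result list via Flag membership and Flag.index/Index bookkeeping by two independent stages: dedupe the tails with dict.fromkeys, then emit each group by re-scanning the whole term list and summing the lead coefficients of terms with that tail.
-- outside the precondition, e.g. on AddFormula([[]], []): A returns [[]], B raises IndexError
import Mathlib
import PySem

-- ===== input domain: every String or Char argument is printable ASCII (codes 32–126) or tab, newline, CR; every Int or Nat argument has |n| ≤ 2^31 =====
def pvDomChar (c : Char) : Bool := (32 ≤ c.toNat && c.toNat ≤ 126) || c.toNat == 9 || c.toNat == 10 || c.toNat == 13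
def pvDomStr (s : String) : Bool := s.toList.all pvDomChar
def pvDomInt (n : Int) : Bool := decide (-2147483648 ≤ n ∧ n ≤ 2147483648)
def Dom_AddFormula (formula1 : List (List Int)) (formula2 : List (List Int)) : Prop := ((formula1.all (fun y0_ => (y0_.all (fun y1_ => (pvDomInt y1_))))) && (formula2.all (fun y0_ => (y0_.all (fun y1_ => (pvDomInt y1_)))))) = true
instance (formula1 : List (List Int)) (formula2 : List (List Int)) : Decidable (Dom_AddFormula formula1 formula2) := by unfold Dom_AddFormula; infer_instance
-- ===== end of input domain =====

-- B replaces A's mutating single pass (result/Flag/Index triple with membership and .index scans)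
-- by two independent stages: dedupe the tails first, then per tail sum the coefficients by a full
-- rescan (objective: alternative decomposition, similar cost).

-- ===== PORT A =====
-- one loop iteration of A: state = (result, Flag, Index)
def pvAStep (st : List (List Int) × List (List Int) × List Nat) (single_formula : List Int) :
    List (List Int) × List (List Int) × List Nat :=
  let result := st.1
  let flag := st.2.1
  let index := st.2.2
  let order_power := PySem.List.slice single_formula (some 1) none   -- single_formula[1:]
  if order_power ∈ flag then
    -- result[Index[Flag.index(order_power)]][0] += single_formula[0]
    match PySem.List.index? flag order_power with
    | some j =>
      let idx := index.getD j 0          -- Index[j]; j < |Index| always holds here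
      (result.set idx
        (match result.getD idx [] with   -- result[idx]; idx < |result| always holds here
         | h :: t => (h + PySem.List.pyGetD single_formula 0 0) :: t   -- [0] += single_formula[0]
         | [] => []),                    -- empty entry: Python raises IndexError (outside Pre_)
       flag, index)
    | none => (result, flag, index)      -- unreachable: order_power ∈ flag
  else
    (result ++ [single_formula], flag ++ [order_power], index ++ [result.length])

def AddFormula (formula1 : List (List Int)) (formula2 : List (List Int)) : List (List Int) :=
  let formula := formula1 ++ formula2
  ((formula.foldl pvAStep ([], [], [])).1)

-- ===== PORT B =====
def AddFormula_alt (formula1 : List (List Int)) (formula2 : List (List Int)) : List (List Int) :=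
  let terms := formula1 ++ formula2
  -- tails = list(dict.fromkeys(tuple(t[1:]) for t in terms))
  let tails := PySem.List.dedup (terms.map (fun t => PySem.List.slice t (some 1) none))
  -- [[sum(t[0] for t in terms if tuple(t[1:]) == tail), *tail] for tail in tails]
  tails.map (fun tail =>
    (((terms.filter (fun t => PySem.List.slice t (some 1) none == tail)).map
        (fun t => PySem.List.pyGetD t 0 0)).sum) :: tail)

-- ===== PRECONDITION & SPEC =====
-- Pre_ excludes inputs containing an empty term: on a REPEATED empty tail A raises IndexError, and B's
-- own term[0] raises on any empty term even where A happens to return (a single empty term).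
def Pre_AddFormula (formula1 : List (List Int)) (formula2 : List (List Int)) : Prop :=
  (∀ t ∈ formula1, t ≠ []) ∧ (∀ t ∈ formula2, t ≠ [])
instance (formula1 : List (List Int)) (formula2 : List (List Int)) : Decidable (Pre_AddFormula formula1 formula2) := by unfold Pre_AddFormula; infer_instance
def pvWitness_AddFormula : List (List Int) × List (List Int) :=
  ([[2,2,2,5,3]], [[3,2,2,5,3],[1,1,3]])
def Spec_AddFormula (formula1 : List (List Int)) (formula2 : List (List Int)) (out : List (List Int)) : Prop := out = AddFormula_alt formula1 formula2
instance (formula1 : List (List Int)) (formula2 : List (List Int)) (out : List (List Int)) : Decidable (Spec_AddFormula formula1 formula2 out) := by unfold Spec_AddFormula; infer_instance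

-- ===== CLAIM (what is proved, stated in full; the proofs are below) =====
def Claim_equal_AddFormula : Prop := ∀ (formula1 : List (List Int)) (formula2 : List (List Int)), Dom_AddFormula formula1 formula2 → Pre_AddFormula formula1 formula2 → Spec_AddFormula formula1 formula2 (AddFormula formula1 formula2)

-- ===== LEMMAS AND PROOFS =====

-- proof-side accumulator: a dict from tail to running coefficient sum, used to characterise A's loop
def pvAccStep (acc : PySem.Dict (List Int) Int) (term : List Int) : PySem.Dict (List Int) Int :=
  acc.insert (PySem.List.slice term (some 1) none)
    (acc.getD (PySem.List.slice term (some 1) none) 0 + PySem.List.pyGetD term 0 0)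

-- replacing the (unique) entry keyed k by map-with-if is List.set at its position
lemma pv_map_if_eq_set (items : List (List Int × Int)) (j : Nat) (k : List Int) (v : Int)
    (hj : j < items.length) (hk : items[j].1 = k) (hnd : (items.map Prod.fst).Nodup) :
    items.map (fun p => if p.1 = k then (k, v) else p) = items.set j (k, v) := by
  induction items generalizing j with
  | nil => simp at hj
  | cons hd tl ih =>
    rw [List.map_cons] at hnd
    obtain ⟨hhd, htl⟩ := List.nodup_cons.mp hnd
    cases j with
    | zero =>
      simp only [List.getElem_cons_zero] at hk
      subst hk
      simp only [List.map_cons, List.set_cons_zero, if_pos]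
      congr 1
      have hrest : ∀ p ∈ tl, (if p.1 = hd.1 then (hd.1, v) else p) = id p := by
        intro p hp
        simp only [id]
        rw [if_neg]
        intro he
        exact hhd (he ▸ List.mem_map_of_mem hp)
      rw [List.map_congr_left hrest, List.map_id]
    | succ j =>
      simp only [List.getElem_cons_succ] at hk
      have hj' : j < tl.length := by simpa using hj
      have hhdne : hd.1 ≠ k := fun he =>
        hhd (by rw [he, ← hk]; exact List.mem_map_of_mem (List.getElem_mem hj'))
      simp only [List.map_cons, if_neg hhdne, List.set_cons_succ]
      congr 1
      exact ih j hj' hk htl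

-- one loop step: A's triple tracks the accumulator dict
lemma pv_step_eq (d : PySem.Dict (List Int) Int) (hnd : d.keys.Nodup) (t : List Int) (ht : t ≠ []) :
    pvAStep (d.items.map (fun p => p.2 :: p.1), d.keys, List.range d.size) t =
      ((pvAccStep d t).items.map (fun p => p.2 :: p.1), (pvAccStep d t).keys, List.range (pvAccStep d t).size) := by
  obtain ⟨a, tl, rfl⟩ : ∃ a tl, t = a :: tl := by
    cases t with | nil => exact absurd rfl ht | cons a tl => exact ⟨a, tl, rfl⟩
  have hslice : PySem.List.slice (a :: tl) (some 1) none = tl := by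
    rw [PySem.List.slice_from_one]; rfl
  have hget0 : PySem.List.pyGetD (a :: tl) 0 0 = a := PySem.List.pyGetD_zero_cons a tl 0
  have hndi : (d.items.map Prod.fst).Nodup := hnd
  by_cases hmem : tl ∈ d.keys
  · -- existing tail: A updates result in place, the dict overwrites its entry in place
    obtain ⟨j, hj⟩ : ∃ j, PySem.List.index? d.keys tl = some j :=
      Option.isSome_iff_exists.mp (by rw [PySem.List.index?_isSome_iff]; exact hmem)
    obtain ⟨hjlt, hjget, -⟩ := PySem.List.getElem_of_index?_eq_some hj
    have hjlt' : j < d.items.length := by simpa [PySem.Dict.keys] using hjlt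
    have hitems1 : (d.items[j]'hjlt').1 = tl := by simpa [PySem.Dict.keys] using hjget
    have hcont : d.contains tl = true := (PySem.Dict.contains_iff_mem_keys d tl).mpr hmem
    have hmemit : (tl, (d.items[j]'hjlt').2) ∈ d.items := by
      rw [← hitems1]
      simp [List.getElem_mem hjlt']
    have hgetD : d.getD tl 0 = (d.items[j]'hjlt').2 :=
      PySem.Dict.getD_of_mem_items d hmemit hnd 0
    have hB1 : (pvAccStep d (a :: tl)).items = d.items.set j (tl, (d.items[j]'hjlt').2 + a) := by
      simp only [pvAccStep, hslice, hget0, hgetD]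
      rw [PySem.Dict.items_insert_of_contains d _ hcont]
      simp only [beq_iff_eq]
      exact pv_map_if_eq_set d.items j tl _ hjlt' hitems1 hndi
    have hB2 : (pvAccStep d (a :: tl)).keys = d.keys := by
      simp only [pvAccStep, hslice]
      exact PySem.Dict.keys_insert_of_contains d _ hcont
    have hB3 : (pvAccStep d (a :: tl)).size = d.size := by
      show (pvAccStep d (a :: tl)).items.length = d.items.length
      rw [hB1]; simp
    have hidx : (List.range d.size).getD j 0 = j := by
      rw [List.getD_eq_getElem _ _ (by simpa [PySem.Dict.size] using hjlt')]
      simp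
    have hres : (d.items.map (fun p => p.2 :: p.1)).getD j [] =
        (d.items[j]'hjlt').2 :: (d.items[j]'hjlt').1 := by
      rw [List.getD_eq_getElem _ _ (by simpa using hjlt')]
      simp
    simp only [pvAStep, hslice, if_pos hmem, hj, hidx, hres, hget0, hB1, hB2, hB3,
      List.map_set, hitems1]
  · -- fresh tail: both append at the end
    have hcont : d.contains tl = false := by
      rw [Bool.eq_false_iff]
      exact fun h => hmem ((PySem.Dict.contains_iff_mem_keys d tl).mp h)
    have hB1 : (pvAccStep d (a :: tl)).items = d.items ++ [(tl, a)] := by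
      simp only [pvAccStep, hslice, hget0, PySem.Dict.getD_of_not_contains d 0 hcont, zero_add]
      exact PySem.Dict.items_insert_of_not_contains d _ hcont
    have hB2 : (pvAccStep d (a :: tl)).keys = d.keys ++ [tl] := by
      simp only [pvAccStep, hslice]
      exact PySem.Dict.keys_insert_of_not_contains d _ hcont
    have hB3 : (pvAccStep d (a :: tl)).size = d.size + 1 := by
      show (pvAccStep d (a :: tl)).items.length = d.items.length + 1
      rw [hB1]; simp
    simp only [pvAStep, hslice, if_neg hmem, hB1, hB2, hB3, List.map_append, List.map_cons,
      List.map_nil, List.range_succ, List.length_map]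
    rfl

-- the whole loop: fold of A's step tracks fold of the accumulator step
lemma pv_fold_eq (l : List (List Int)) (hl : ∀ t ∈ l, t ≠ []) :
    ∀ (d : PySem.Dict (List Int) Int), d.keys.Nodup →
    l.foldl pvAStep (d.items.map (fun p => p.2 :: p.1), d.keys, List.range d.size) =
      ((l.foldl pvAccStep d).items.map (fun p => p.2 :: p.1), (l.foldl pvAccStep d).keys,
        List.range (l.foldl pvAccStep d).size) := by
  induction l with
  | nil => intro d _; simp
  | cons t rest ih =>
    intro d hnd
    have hnd' : (pvAccStep d t).keys.Nodup := by
      simp only [pvAccStep]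
      exact PySem.Dict.nodup_keys_insert _ _ _ hnd
    simp only [List.foldl_cons, pv_step_eq d hnd t (hl t (by simp))]
    exact ih (fun s hs => hl s (by simp [hs])) (pvAccStep d t) hnd'

-- the accumulated value at key k is the sum of the coefficients of the terms with tail k
lemma pv_getD_fold (l : List (List Int)) :
    ∀ (d : PySem.Dict (List Int) Int) (k : List Int),
    (l.foldl pvAccStep d).getD k 0 =
      d.getD k 0 +
        ((l.filter (fun t => PySem.List.slice t (some 1) none == k)).map
          (fun t => PySem.List.pyGetD t 0 0)).sum := by
  induction l with
  | nil => intro d k; simp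
  | cons t rest ih =>
    intro d k
    simp only [List.foldl_cons, List.filter_cons]
    by_cases hk : PySem.List.slice t (some 1) none = k
    · rw [if_pos (by simpa using hk)]
      subst hk
      rw [ih]
      simp only [pvAccStep, PySem.Dict.getD_insert, if_true,
        List.map_cons, List.sum_cons]
      ring
    · rw [if_neg (by simpa using hk)]
      rw [ih]
      simp only [pvAccStep, PySem.Dict.getD_insert, if_neg (Ne.symm hk)]

-- the accumulator's keys are the distinct tails in first-appearance order
lemma pv_keys_fold (l : List (List Int)) :
    (l.foldl pvAccStep PySem.Dict.empty).keys =
      PySem.List.dedup (l.map (fun t => PySem.List.slice t (some 1) none)) := by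
  show (l.foldl (fun (d : PySem.Dict (List Int) Int) t =>
      d.insert (PySem.List.slice t (some 1) none)
        (d.getD (PySem.List.slice t (some 1) none) 0 + PySem.List.pyGetD t 0 0))
      PySem.Dict.empty).keys = _
  rw [PySem.Dict.keys_foldl_insert_key]
  simp [PySem.List.dedup_eq_ofList, PySem.Set.ofList_eq_foldl, PySem.Set.update,
    PySem.Dict.keys_empty]

lemma pv_nodup_keys_fold (l : List (List Int)) :
    (l.foldl pvAccStep PySem.Dict.empty).keys.Nodup := by
  show (l.foldl (fun (d : PySem.Dict (List Int) Int) t =>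
      d.insert (PySem.List.slice t (some 1) none)
        (d.getD (PySem.List.slice t (some 1) none) 0 + PySem.List.pyGetD t 0 0))
      PySem.Dict.empty).keys.Nodup
  exact PySem.Dict.nodup_keys_foldl_insert_key l _ _ PySem.Dict.empty (by simp)

-- ===== VERDICT (by name: the statement is the Claim_ definition above) =====
theorem AddFormula_spec : Claim_equal_AddFormula := by
  intro f1 f2 _ hpre
  show AddFormula f1 f2 = AddFormula_alt f1 f2
  have hne : ∀ t ∈ f1 ++ f2, t ≠ [] := by
    intro t ht
    rcases List.mem_append.mp ht with h | h
    · exact hpre.1 t h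
    · exact hpre.2 t h
  have h := pv_fold_eq (f1 ++ f2) hne PySem.Dict.empty (by simp [PySem.Dict.keys_empty])
  set D := (f1 ++ f2).foldl pvAccStep PySem.Dict.empty with hD
  have hA : AddFormula f1 f2 = D.items.map (fun p => p.2 :: p.1) := by
    simp only [AddFormula]
    rw [show ((PySem.Dict.empty : PySem.Dict (List Int) Int).items.map (fun p => p.2 :: p.1),
        (PySem.Dict.empty : PySem.Dict (List Int) Int).keys,
        List.range (PySem.Dict.empty : PySem.Dict (List Int) Int).size) =
        (([] : List (List Int)), ([] : List (List Int)), ([] : List Nat)) from rfl] at h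
    rw [h]
  rw [hA, PySem.Dict.items_eq_map_keys D (pv_nodup_keys_fold _) 0, List.map_map]
  simp only [AddFormula_alt]
  rw [← pv_keys_fold (f1 ++ f2)]
  apply List.map_congr_left
  intro k _
  simp only [Function.comp]
  rw [hD, pv_getD_fold (f1 ++ f2) PySem.Dict.empty k]
  simp
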